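-- pv_equiv track=rewrite | github.com/arqeyl/decipher.py | decipher.py | _decipher_keyword
-- ===== SOURCE A (Python) =====
-- def _deciphered_answer(answer):
--     out = ''
--     for m in answer:
--         out+=m
--     return out
--
-- def _decipher_keyword(arrange1, arrange2, arrange3):
--     ans = []
--     answer = []
--     for i in range(0,len(arrange1)):
--         for j in range(0,len(arrange2)):
--             if arrange1[i] == arrange2[j]:
--                 ans.append(j)
--     for k in range(0,len(ans)):
--         answer.append(arrange3[ans[k]])
--     return _deciphered_answer(answer)
-- ===== SOURCE B (Python) =====
-- def _decipher_keyword(arrange1, arrange2, arrange3):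
--     positions = {}
--     for j, c in enumerate(arrange2):
--         positions.setdefault(c, []).append(j)
--     return ''.join(arrange3[j] for c in arrange1 for j in positions.get(c, ()))
-- ===== Notes on version B (the rewrite author's own statement) =====
-- stated objective: faster
-- what changed: Replaced the nested scan of arrange2 for every character of arrange1 by a dict mapping each character of arrange2 to its list of indices, built once, followed by a single lookup pass over arrange1.
import Mathlib
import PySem

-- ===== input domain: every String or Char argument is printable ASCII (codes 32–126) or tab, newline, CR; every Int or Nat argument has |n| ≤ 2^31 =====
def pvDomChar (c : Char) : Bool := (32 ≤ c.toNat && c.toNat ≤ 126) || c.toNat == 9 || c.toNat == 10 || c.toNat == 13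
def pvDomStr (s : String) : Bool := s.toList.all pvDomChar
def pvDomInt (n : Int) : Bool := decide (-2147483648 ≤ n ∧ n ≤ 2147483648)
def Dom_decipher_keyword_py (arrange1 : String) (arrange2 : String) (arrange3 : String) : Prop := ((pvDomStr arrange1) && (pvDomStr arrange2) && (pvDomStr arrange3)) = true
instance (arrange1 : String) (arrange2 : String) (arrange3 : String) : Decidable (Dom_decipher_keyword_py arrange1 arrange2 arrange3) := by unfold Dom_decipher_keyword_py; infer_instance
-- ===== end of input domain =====

-- B replaces A's quadratic nested scan by a dict char→index-list built once over arrange2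
-- followed by a single pass over arrange1 (objective: faster, O(n*m) → O(n+m+output)).
-- Equal return values on Pre_ (where A returns without IndexError); no mutation involved.

-- ===== PORT A =====
-- answer list is concatenated into a string character by character (_deciphered_answer)
def deciphered_answer_loop (answer : List Char) : List Char :=
  answer.foldl (fun out m => out ++ [m]) []

def decipher_keyword_py (arrange1 : String) (arrange2 : String) (arrange3 : String) : String :=
  let l1 := arrange1.toList
  let l2 := arrange2.toList
  let l3 := arrange3.toList
  let ans : List Int :=
    (PySem.List.pyRange 0 (PySem.List.len l1)).foldl (fun ans i =>
      (PySem.List.pyRange 0 (PySem.List.len l2)).foldl (fun ans j =>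
        if PySem.List.pyGetD l1 i ' ' == PySem.List.pyGetD l2 j ' ' then ans ++ [j] else ans)
        ans) []
  -- arrange3[ans[k]] raises IndexError when ans[k] ≥ len(arrange3); Pre_ excludes that, so the
  -- default ' ' of pyGetD is never read on admitted inputs
  let answer : List Char :=
    (PySem.List.pyRange 0 (PySem.List.len ans)).foldl (fun acc k =>
      acc ++ [PySem.List.pyGetD l3 (PySem.List.pyGetD ans k 0) ' ']) []
  String.mk (deciphered_answer_loop answer)

-- ===== PORT B =====
def decipher_keyword_py_alt (arrange1 : String) (arrange2 : String) (arrange3 : String) : String :=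
  let l2 := arrange2.toList
  let l3 := arrange3.toList
  -- positions.setdefault(c, []).append(j)  =  insert c (getD c [] ++ [j])
  let positions : PySem.Dict Char (List Int) :=
    (PySem.List.enumerate l2).foldl
      (fun d jc => d.insert jc.2 (d.getD jc.2 [] ++ [jc.1])) PySem.Dict.empty
  String.mk (arrange1.toList.flatMap (fun c =>
    (positions.getD c []).map (fun j => PySem.List.pyGetD l3 j ' ')))

-- ===== PRECONDITION & SPEC =====
-- Pre_ excludes exactly the inputs on which A raises IndexError: some position j of arrange2
-- whose character occurs in arrange1 is out of range for arrange3.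
def Pre_decipher_keyword_py (arrange1 : String) (arrange2 : String) (arrange3 : String) : Prop :=
  ∀ j ∈ List.range arrange2.toList.length,
    arrange2.toList.getD j ' ' ∈ arrange1.toList → j < arrange3.toList.length
instance (arrange1 : String) (arrange2 : String) (arrange3 : String) : Decidable (Pre_decipher_keyword_py arrange1 arrange2 arrange3) := by unfold Pre_decipher_keyword_py; infer_instance

def pvWitness_decipher_keyword_py : String × String × String := ("ab", "ba", "xy")

def Spec_decipher_keyword_py (arrange1 : String) (arrange2 : String) (arrange3 : String) (out : String) : Prop := out = decipher_keyword_py_alt arrange1 arrange2 arrange3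
instance (arrange1 : String) (arrange2 : String) (arrange3 : String) (out : String) : Decidable (Spec_decipher_keyword_py arrange1 arrange2 arrange3 out) := by unfold Spec_decipher_keyword_py; infer_instance

-- ===== CLAIM (what is proved, stated in full; the proofs are below) =====
def Claim_equal_decipher_keyword_py : Prop := ∀ (arrange1 : String) (arrange2 : String) (arrange3 : String), Dom_decipher_keyword_py arrange1 arrange2 arrange3 → Pre_decipher_keyword_py arrange1 arrange2 arrange3 → Spec_decipher_keyword_py arrange1 arrange2 arrange3 (decipher_keyword_py arrange1 arrange2 arrange3)

-- ===== LEMMAS AND PROOFS =====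

-- characterisation of B's dict: getD after the building fold is the old value followed by the
-- first components of the matching pairs, in order
theorem pv_dict_getD (ps : List (Int × Char)) (d : PySem.Dict Char (List Int)) (c : Char) :
    ((ps.foldl (fun d jc => d.insert jc.2 (d.getD jc.2 [] ++ [jc.1])) d).getD c [])
      = d.getD c [] ++ (ps.filter (fun p => p.2 == c)).map Prod.fst := by
  induction ps generalizing d with
  | nil => simp
  | cons jc rest ih =>
    simp only [List.foldl_cons, List.filter_cons, ih]
    rw [PySem.Dict.getD_insert]
    by_cases h : c = jc.2
    · simp [h]
    · have h' : (jc.2 == c) = false := by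
        simp only [beq_eq_false_iff_ne]; exact fun e => h e.symm
      simp [h, h']

-- indexing a list by all positions of range(len(l)) is the list itself, composed with g
theorem pv_map_getD {a b : Type} (l : List a) (d : a) (g : a → b) :
    (PySem.List.pyRange 0 (PySem.List.len l)).map (fun k => g (PySem.List.pyGetD l k d))
      = l.map g := by
  conv_rhs => rw [← PySem.List.map_pyGetD_pyRange_zero l d]
  rw [List.map_map]
  rfl

theorem pv_flatMap_getD {a b : Type} (l : List a) (d : a) (F : a → List b) :
    (PySem.List.pyRange 0 (PySem.List.len l)).flatMap (fun i => F (PySem.List.pyGetD l i d))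
      = l.flatMap F := by
  conv_rhs => rw [← PySem.List.map_pyGetD_pyRange_zero l d]
  rw [List.flatMap_map]

theorem decipher_keyword_py_eq (arrange1 arrange2 arrange3 : String) :
    decipher_keyword_py arrange1 arrange2 arrange3
      = decipher_keyword_py_alt arrange1 arrange2 arrange3 := by
  unfold decipher_keyword_py decipher_keyword_py_alt
  simp only [PySem.List.foldl_append_singleton_eq_map, List.nil_append]
  simp only [PySem.List.foldl_append_if_eq_filter, PySem.List.foldl_append_eq_flatMap,
    List.nil_append]
  rw [deciphered_answer_loop, PySem.List.foldl_append_singleton_eq_self, List.nil_append]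
  rw [pv_map_getD
    (List.flatMap (fun i =>
        List.filter (fun j => PySem.List.pyGetD arrange1.toList i ' ' ==
            PySem.List.pyGetD arrange2.toList j ' ')
          (PySem.List.pyRange 0 (PySem.List.len arrange2.toList)))
      (PySem.List.pyRange 0 (PySem.List.len arrange1.toList)))
    0 (fun y => PySem.List.pyGetD arrange3.toList y ' ')]
  rw [List.map_flatMap]
  rw [pv_flatMap_getD arrange1.toList ' '
    (fun c => (List.filter (fun j => c == PySem.List.pyGetD arrange2.toList j ' ')
        (PySem.List.pyRange 0 (PySem.List.len arrange2.toList))).map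
      (fun j => PySem.List.pyGetD arrange3.toList j ' '))]
  simp only [pv_dict_getD, PySem.Dict.getD_empty, List.nil_append,
    PySem.List.enumerate_eq_map_pyRange arrange2.toList ' ', List.filter_map, List.map_map]
  congr 1
  congr 1
  funext c
  congr 1
  congr 1
  funext j
  simp only [Function.comp]
  exact Bool.beq_comm

-- ===== VERDICT (by name: the statement is the Claim_ definition above) =====
theorem decipher_keyword_py_spec : Claim_equal_decipher_keyword_py := by
  intro a1 a2 a3 _ _
  unfold Spec_decipher_keyword_py
  exact decipher_keyword_py_eq a1 a2 a3
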